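-- pv_equiv track=rewrite | github.com/LilBresss/esercizi_python | es1.py | competizione_con_piu_giudici
-- ===== SOURCE A (Python) =====
-- def competizione_con_piu_giudici(tupla_competizioni):
--     max = 0
--     for (chef, piatto, punteggio, nGiudici) in tupla_competizioni:
--         if(nGiudici > max):
--             max = nGiudici
--
--     listaMax = []
--     for (chef, piatto, punteggio, nGiudici) in tupla_competizioni:
--         if(nGiudici == max):
--             listaMax.append((chef, piatto, punteggio, nGiudici))
--
--     return listaMax
-- ===== SOURCE B (Python) =====
-- def competizione_con_piu_giudici(tupla_competizioni):
--     cur_max = 0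
--     lista_max = []
--     for t in tupla_competizioni:
--         n = t[3]
--         if n > cur_max:
--             cur_max = n
--             lista_max = [t]
--         elif n == cur_max:
--             lista_max.append(t)
--     return lista_max
-- ===== Notes on version B (the rewrite author's own statement) =====
-- stated objective: simpler
-- what changed: Replaces A's two passes (one to find the maximum judge count, one to filter) by a single pass maintaining a running maximum and the result list, resetting on a new maximum and appending on ties.
import Mathlib
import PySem

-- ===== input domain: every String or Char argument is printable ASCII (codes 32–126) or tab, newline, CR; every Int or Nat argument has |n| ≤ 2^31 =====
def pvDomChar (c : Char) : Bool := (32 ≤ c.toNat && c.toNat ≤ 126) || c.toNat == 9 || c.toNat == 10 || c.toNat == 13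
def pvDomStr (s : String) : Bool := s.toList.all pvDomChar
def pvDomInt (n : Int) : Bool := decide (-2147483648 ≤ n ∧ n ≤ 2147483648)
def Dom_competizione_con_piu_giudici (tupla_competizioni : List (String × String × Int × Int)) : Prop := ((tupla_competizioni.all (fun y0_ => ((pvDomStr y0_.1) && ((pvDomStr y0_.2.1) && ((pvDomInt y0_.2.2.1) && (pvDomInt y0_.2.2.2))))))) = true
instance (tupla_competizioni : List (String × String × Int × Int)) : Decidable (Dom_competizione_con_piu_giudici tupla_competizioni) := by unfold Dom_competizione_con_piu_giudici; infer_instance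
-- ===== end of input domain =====

-- B replaces A's two passes (max then filter) by one pass keeping a running maximum and the list; objective: simpler.


-- ===== PORT A =====
-- first loop of A: running maximum starting at 0
def pvMaxLoop (m : Int) (xs : List (String × String × Int × Int)) : Int :=
  xs.foldl (fun m t => if t.2.2.2 > m then t.2.2.2 else m) m

def competizione_con_piu_giudici (tupla_competizioni : List (String × String × Int × Int)) : List (String × String × Int × Int) :=
  let max := pvMaxLoop 0 tupla_competizioni
  -- second loop of A: collect the tuples whose nGiudici equals max
  tupla_competizioni.foldl (fun listaMax t => if t.2.2.2 = max then listaMax ++ [t] else listaMax) []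

-- ===== PORT B =====
-- single pass: reset the list on a new maximum, append on a tie
def pvAltLoop (m : Int) (acc : List (String × String × Int × Int)) :
    List (String × String × Int × Int) → List (String × String × Int × Int)
  | [] => acc
  | t :: rest =>
      if t.2.2.2 > m then pvAltLoop t.2.2.2 [t] rest
      else if t.2.2.2 = m then pvAltLoop m (acc ++ [t]) rest
      else pvAltLoop m acc rest

def competizione_con_piu_giudici_alt (tupla_competizioni : List (String × String × Int × Int)) : List (String × String × Int × Int) :=
  pvAltLoop 0 [] tupla_competizioni

-- ===== PRECONDITION & SPEC =====
def Spec_competizione_con_piu_giudici (tupla_competizioni : List (String × String × Int × Int)) (out : List (String × String × Int × Int)) : Prop := out = competizione_con_piu_giudici_alt tupla_competizioni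
instance (tupla_competizioni : List (String × String × Int × Int)) (out : List (String × String × Int × Int)) : Decidable (Spec_competizione_con_piu_giudici tupla_competizioni out) := by unfold Spec_competizione_con_piu_giudici; infer_instance

-- ===== CLAIM (what is proved, stated in full; the proofs are below) =====
def Claim_equal_competizione_con_piu_giudici : Prop := ∀ (tupla_competizioni : List (String × String × Int × Int)), Dom_competizione_con_piu_giudici tupla_competizioni → Spec_competizione_con_piu_giudici tupla_competizioni (competizione_con_piu_giudici tupla_competizioni)

-- ===== LEMMAS AND PROOFS =====
theorem pvMaxLoop_le (xs : List (String × String × Int × Int)) (m : Int) :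
    m ≤ pvMaxLoop m xs := by
  induction xs generalizing m with
  | nil => simp [pvMaxLoop]
  | cons t rest ih =>
      simp only [pvMaxLoop, List.foldl] at *
      split_ifs with h
      · exact le_of_lt (lt_of_lt_of_le h (ih _))
      · exact ih m

-- A's second loop is the filter by the final maximum
theorem pvALoop_eq_filter (M : Int) (xs : List (String × String × Int × Int))
    (acc : List (String × String × Int × Int)) :
    xs.foldl (fun listaMax t => if t.2.2.2 = M then listaMax ++ [t] else listaMax) acc
      = acc ++ xs.filter (fun t => t.2.2.2 = M) := by
  induction xs generalizing acc with
  | nil => simp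
  | cons t rest ih =>
      simp only [List.foldl, List.filter]
      by_cases h : t.2.2.2 = M <;> simp [h, ih, List.append_assoc]

-- invariant of B's single pass
theorem pvAltLoop_eq (xs : List (String × String × Int × Int)) (m : Int)
    (acc : List (String × String × Int × Int)) :
    pvAltLoop m acc xs
      = (if pvMaxLoop m xs = m then acc else [])
        ++ xs.filter (fun t => t.2.2.2 = pvMaxLoop m xs) := by
  induction xs generalizing m acc with
  | nil => simp [pvAltLoop, pvMaxLoop]
  | cons t rest ih =>
      have hM : pvMaxLoop m (t :: rest)
          = pvMaxLoop (if t.2.2.2 > m then t.2.2.2 else m) rest := by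
        simp [pvMaxLoop, List.foldl]
      by_cases h : t.2.2.2 > m
      · have e1 : pvAltLoop m acc (t :: rest) = pvAltLoop t.2.2.2 [t] rest := by
          simp [pvAltLoop, h]
        have hMe : pvMaxLoop m (t :: rest) = pvMaxLoop t.2.2.2 rest := by
          rw [hM]; simp [h]
        have hge : t.2.2.2 ≤ pvMaxLoop t.2.2.2 rest := pvMaxLoop_le rest _
        have hne : pvMaxLoop t.2.2.2 rest ≠ m := by omega
        rw [e1, ih, hMe]
        by_cases he : pvMaxLoop t.2.2.2 rest = t.2.2.2
        · rw [he]
          simp [List.filter, show t.2.2.2 ≠ m by omega]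
        · have : t.2.2.2 ≠ pvMaxLoop t.2.2.2 rest := fun hx => he hx.symm
          simp [List.filter, hne, he, this]
      · have hMe : pvMaxLoop m (t :: rest) = pvMaxLoop m rest := by
          rw [hM]; simp [h]
        have hge : m ≤ pvMaxLoop m rest := pvMaxLoop_le rest m
        by_cases he : t.2.2.2 = m
        · have e1 : pvAltLoop m acc (t :: rest) = pvAltLoop m (acc ++ [t]) rest := by
            simp [pvAltLoop, h, he]
          rw [e1, ih, hMe]
          by_cases hf : pvMaxLoop m rest = m
          · simp [List.filter, he, hf, List.append_assoc]
          · have : t.2.2.2 ≠ pvMaxLoop m rest := by omega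
            simp [List.filter, this, hf]
        · have e1 : pvAltLoop m acc (t :: rest) = pvAltLoop m acc rest := by
            simp [pvAltLoop, h, he]
          have : t.2.2.2 ≠ pvMaxLoop m rest := by omega
          rw [e1, ih, hMe]
          simp [List.filter, this]

-- ===== VERDICT (by name: the statement is the Claim_ definition above) =====
theorem competizione_con_piu_giudici_spec : Claim_equal_competizione_con_piu_giudici := by
  intro xs _
  show _ = _
  unfold competizione_con_piu_giudici competizione_con_piu_giudici_alt
  rw [pvALoop_eq_filter, pvAltLoop_eq]
  split_ifs <;> simp
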